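-- pv_equiv track=rewrite | github.com/ucbrise/flor | flor/transformer/code_gen.py | mask_lattice
-- ===== SOURCE A (Python) =====
-- def mask_lattice(names):
--     """
--     names: [self, self.training, self.model, optimizer]
--     """
--     def is_prefixed_by(name, prefix):
--         if len(prefix) >= len(name):
--             return False
--         name = name[0:len(prefix)]
--         for l,r in zip(name, prefix):
--             if l != r:
--                 return False
--         return True
--     names = [name.split('.') for name in names]
--     mask = []
--     for i, out_name in enumerate(names):
--         mask.append(i)
--         for j, in_name in enumerate(names):
--             if i == j:
--                 continue
--             if is_prefixed_by(out_name, in_name):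
--                 mask.pop()
--                 break
--     return mask
-- ===== SOURCE B (Python) =====
-- def mask_lattice(names):
--     """
--     names: [self, self.training, self.model, optimizer]
--     """
--     toks = [tuple(name.split('.')) for name in names]
--     present = set(toks)
--     return [i for i, t in enumerate(toks)
--             if not any(t[:k] in present for k in range(1, len(t)))]
-- ===== Notes on version B (the rewrite author's own statement) =====
-- stated objective: faster
-- what changed: Replaces the all-pairs quadratic prefix scan (each name compared against every other name) with a single hash set of all dotted-token tuples, testing each name's proper dotted prefixes for membership.
import Mathlib
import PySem

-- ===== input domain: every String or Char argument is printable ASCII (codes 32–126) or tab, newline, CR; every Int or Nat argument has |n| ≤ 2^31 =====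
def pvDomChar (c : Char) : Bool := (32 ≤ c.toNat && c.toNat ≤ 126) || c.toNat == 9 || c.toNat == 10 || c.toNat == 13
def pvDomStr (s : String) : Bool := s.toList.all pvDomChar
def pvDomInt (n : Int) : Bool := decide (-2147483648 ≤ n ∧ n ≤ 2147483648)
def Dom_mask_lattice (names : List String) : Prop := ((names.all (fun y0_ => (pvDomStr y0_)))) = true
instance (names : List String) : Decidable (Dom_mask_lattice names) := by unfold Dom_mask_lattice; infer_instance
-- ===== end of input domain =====

-- B replaces A's all-pairs prefix scan with one set of all dotted-token tuples and a
-- per-name membership test of its proper prefixes (objective: faster, asymptotically).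

-- ===== PORT A =====
-- tokens of a dotted name are kept as List Char (PySem.Chars.splitOn = str.split with a non-empty sep)
def isPrefixedBy (name pfx : List (List Char)) : Bool :=
  if pfx.length ≥ name.length then false
  else
    -- name = name[0:len(prefix)]
    let name' := PySem.List.slice name (some 0) (some (pfx.length : Int))
    -- for l,r in zip(name, prefix): if l != r: return False ; return True
    (name'.zip pfx).all (fun lr => lr.1 == lr.2)

-- the inner 'for j, in_name in enumerate(names)' loop; returns true iff it broke (popped)
def maskInner (i : Int) (out_name : List (List Char)) :
    List (Int × List (List Char)) → Bool
  | [] => false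
  | (j, in_name) :: rest =>
      if i == j then maskInner i out_name rest
      else if isPrefixedBy out_name in_name then true
      else maskInner i out_name rest

def mask_lattice (names : List String) : List Int :=
  let names' := names.map (fun name => PySem.Chars.splitOn name.toList ['.'])
  (PySem.List.enumerate names').foldl
    (fun mask p =>
      let mask' := mask ++ [p.1]                                       -- mask.append(i)
      if maskInner p.1 p.2 (PySem.List.enumerate names') then
        mask'.dropLast                                                 -- mask.pop() on break
      else mask') []

-- ===== PORT B =====
def mask_lattice_alt (names : List String) : List Int :=
  let toks := names.map (fun name => PySem.Chars.splitOn name.toList ['.'])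
  let present : PySem.Set (List (List Char)) := PySem.Set.ofList toks
  ((PySem.List.enumerate toks).filter (fun p =>
      !((PySem.List.pyRange 1 (p.2.length : Int) 1).any (fun k =>
          PySem.Set.contains present (PySem.List.slice p.2 none (some k)))))).map
    (fun p => p.1)

-- ===== PRECONDITION & SPEC =====
def Spec_mask_lattice (names : List String) (out : List Int) : Prop := out = mask_lattice_alt names
instance (names : List String) (out : List Int) : Decidable (Spec_mask_lattice names out) := by unfold Spec_mask_lattice; infer_instance

-- ===== CLAIM (what is proved, stated in full; the proofs are below) =====
def Claim_equal_mask_lattice : Prop := ∀ (names : List String), Dom_mask_lattice names → Spec_mask_lattice names (mask_lattice names)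

-- ===== LEMMAS AND PROOFS =====

-- zipped equality test is list equality (on equal lengths)
theorem allZipEq_iff (a b : List (List Char)) (h : a.length = b.length) :
    ((a.zip b).all (fun lr => lr.1 == lr.2) = true) ↔ a = b := by
  induction a generalizing b with
  | nil => cases b <;> simp_all
  | cons x xs ih =>
    cases b with
    | nil => simp_all
    | cons y ys =>
      simp only [List.zip_cons_cons, List.all_cons, Bool.and_eq_true, beq_iff_eq,
        List.cons.injEq]
      constructor
      · rintro ⟨h1, h2⟩; exact ⟨h1, (ih ys (by simpa using h)).mp h2⟩
      · rintro ⟨h1, h2⟩; exact ⟨h1, (ih ys (by simpa using h)).mpr h2⟩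

theorem isPrefixedBy_iff (n p : List (List Char)) :
    isPrefixedBy n p = true ↔ p.length < n.length ∧ n.take p.length = p := by
  unfold isPrefixedBy
  by_cases hge : p.length ≥ n.length
  · rw [if_pos hge]
    simp only [Bool.false_eq_true, false_iff]
    rintro ⟨h, -⟩; omega
  · have hlt : p.length < n.length := by omega
    simp only [hge, if_false]
    rw [PySem.List.slice_zero_start, PySem.List.slice_to_natCast]
    rw [allZipEq_iff _ _ (by simp; omega)]
    simp [hlt]

theorem maskInner_eq_any (i : Int) (out : List (List Char))
    (l : List (Int × List (List Char))) :
    maskInner i out l = l.any (fun q => !(i == q.1) && isPrefixedBy out q.2) := by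
  induction l with
  | nil => rfl
  | cons q rest ih =>
    obtain ⟨j, inn⟩ := q
    by_cases hij : i == j
    · simp [maskInner, hij, ih]
    · by_cases hp : isPrefixedBy out inn <;>
        simp [maskInner, hij, hp, ih]

-- the two break tests agree on every enumerated element (token lists are nonempty)
theorem pred_eq (toks : List (List (List Char)))
    (hne : ∀ t ∈ toks, t ≠ []) (i : Int) (out : List (List Char))
    (hmem : (i, out) ∈ PySem.List.enumerate toks 0) :
    maskInner i out (PySem.List.enumerate toks 0) =
      (PySem.List.pyRange 1 (out.length : Int) 1).any (fun k =>
        PySem.Set.contains (PySem.Set.ofList toks) (PySem.List.slice out none (some k))) := by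
  obtain ⟨ki, hki, hpi⟩ := (PySem.List.mem_enumerate_iff _ _ _).mp hmem
  have hi : i = (ki : Int) := by simpa using congrArg Prod.fst hpi
  have hout : out = toks[ki] := by simpa using congrArg Prod.snd hpi
  rw [maskInner_eq_any]
  apply Bool.eq_iff_iff.mpr
  simp only [List.any_eq_true, Bool.and_eq_true, Bool.not_eq_true', beq_eq_false_iff_ne,
    PySem.List.mem_enumerate_iff, PySem.List.mem_pyRange_one]
  constructor
  · rintro ⟨q, ⟨kj, hkj, rfl⟩, hne', hpref⟩
    rw [isPrefixedBy_iff] at hpref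
    obtain ⟨hlen, htake⟩ := hpref
    have h1 : 1 ≤ (toks[kj].length : Int) := by
      have := hne toks[kj] (List.getElem_mem hkj)
      have : toks[kj].length ≠ 0 := by simpa [List.length_eq_zero_iff] using this
      omega
    refine ⟨(toks[kj].length : Int), ⟨h1, by exact_mod_cast hlen⟩, ?_⟩
    rw [PySem.List.slice_to_natCast, htake]
    have hm : toks[kj] ∈ toks := List.getElem_mem hkj
    simp [pysem, hm]
  · rintro ⟨k, ⟨h1, h2⟩, hcont⟩
    have hk0 : 0 ≤ k := by omega
    rw [PySem.List.slice_to _ hk0] at hcont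
    have hmem' : List.take k.toNat out ∈ toks := by simpa [pysem] using hcont
    obtain ⟨kj, hkj, hgj⟩ := List.mem_iff_getElem.mp hmem'
    have hlen : (List.take k.toNat out).length = k.toNat := by
      rw [List.length_take]; omega
    refine ⟨((kj : Int), toks[kj]), ⟨kj, hkj, by simp⟩, ?_, ?_⟩
    · intro hji
      rw [hi] at hji
      have hkk : ki = kj := by simpa using hji
      have hl : out.length = k.toNat := by
        rw [hout]; simp only [hkk]; rw [hgj]; exact hlen
      omega
    · show isPrefixedBy out toks[kj] = true
      rw [isPrefixedBy_iff, hgj, hlen]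
      exact ⟨by omega, rfl⟩

-- every branch of split's worker returns a reversed cons, hence a nonempty list
theorem splitOn_go_ne_nil (sep : List Char) (fuel : Nat) (l cur : List Char)
    (acc : List (List Char)) : PySem.Chars.splitOn.go sep fuel l cur acc ≠ [] := by
  induction fuel generalizing l cur acc with
  | zero => rw [PySem.Chars.splitOn.go.eq_def]; simp
  | succ n ih =>
    rw [PySem.Chars.splitOn.go.eq_def]
    cases l with
    | nil => simp
    | cons c rest =>
      dsimp only
      split
      · exact ih _ _ _
      · exact ih _ _ _

-- every token list produced by str.split('.') is nonempty
theorem splitOn_ne_nil (s : List Char) : PySem.Chars.splitOn s ['.'] ≠ [] := by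
  unfold PySem.Chars.splitOn
  exact splitOn_go_ne_nil _ _ _ _ _

-- ===== VERDICT (by name: the statement is the Claim_ definition above) =====
theorem mask_lattice_spec : Claim_equal_mask_lattice := by
  intro names _
  unfold Spec_mask_lattice mask_lattice mask_lattice_alt
  dsimp only
  set toks := names.map (fun name => PySem.Chars.splitOn name.toList ['.']) with htoks
  have hne : ∀ t ∈ toks, t ≠ [] := by
    intro t ht
    rw [htoks, List.mem_map] at ht
    obtain ⟨s, _, rfl⟩ := ht
    exact splitOn_ne_nil s.toList
  -- rewrite A's fold body into the append-if shape
  have hfold :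
      List.foldl
        (fun mask (p : Int × List (List Char)) =>
          if maskInner p.1 p.2 (PySem.List.enumerate toks) = true then
            (mask ++ [p.1]).dropLast
          else mask ++ [p.1]) [] (PySem.List.enumerate toks)
      = List.foldl
          (fun mask (p : Int × List (List Char)) =>
            if (!maskInner p.1 p.2 (PySem.List.enumerate toks)) = true then
              mask ++ [p.1]
            else mask) [] (PySem.List.enumerate toks) := by
    apply PySem.List.foldl_congr_mem
    intro acc x _
    by_cases h : maskInner x.1 x.2 (PySem.List.enumerate toks) <;>
      simp [h]
  rw [hfold, PySem.List.foldl_append_if]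
  simp only [List.nil_append]
  congr 1
  apply List.filter_congr
  intro p hp
  obtain ⟨i, out⟩ := p
  rw [pred_eq toks hne i out hp]
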